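-- pv_equiv track=rewrite | github.com/ooladuwa/cs-problemSets | Sprint Challenges/2-checkBlanagrams.py | checkBlanagrams
-- ===== SOURCE A (Python) =====
-- def checkBlanagrams(word1, word2):
--     d={}
--     count = 0
--     word1= sorted(word1)
--     word2 = sorted(word2)
--
--     if word1 == word2:
--         return False
--
--     for i in range(len(word1)):
--         if i not in d:
--             d[i] = word1[i]
--
--     for j, v in d.items():
--         if v not in word2:
--             count += 1
--
--     if count <= 1:
--         return True
--     else:
--         return False
-- ===== SOURCE B (Python) =====
-- def checkBlanagrams(word1, word2):
--     c1 = {}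
--     for ch in word1:
--         c1[ch] = c1.get(ch, 0) + 1
--     c2 = {}
--     for ch in word2:
--         c2[ch] = c2.get(ch, 0) + 1
--     if c1 == c2:
--         return False
--     missing = sum(n for ch, n in c1.items() if ch not in c2)
--     return missing <= 1
-- ===== Notes on version B (the rewrite author's own statement) =====
-- stated objective: faster
-- what changed: B replaces A's sort-both-words anagram test and its per-index dict scan (each entry re-scanned against word2 by a linear 'in') by character-frequency counters: counter equality decides the anagram case, and the missing-letter count is a sum over distinct characters of word1 absent from word2, weighted by multiplicity.
import Mathlib
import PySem

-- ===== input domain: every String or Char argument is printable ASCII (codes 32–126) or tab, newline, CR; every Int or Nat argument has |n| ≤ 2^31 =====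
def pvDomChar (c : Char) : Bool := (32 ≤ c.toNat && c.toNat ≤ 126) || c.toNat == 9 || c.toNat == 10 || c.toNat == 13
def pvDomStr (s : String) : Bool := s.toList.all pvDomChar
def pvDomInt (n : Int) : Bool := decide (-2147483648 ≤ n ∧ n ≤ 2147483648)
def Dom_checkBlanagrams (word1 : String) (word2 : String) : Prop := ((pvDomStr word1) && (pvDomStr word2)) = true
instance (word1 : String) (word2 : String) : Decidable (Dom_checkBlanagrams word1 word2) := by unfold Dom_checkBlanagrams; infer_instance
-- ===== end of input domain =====

-- B replaces A's sort-and-index-dict blanagram test by frequency counters: counter equality for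
-- the anagram check and a sum over distinct missing characters weighted by multiplicity (faster: one pass, no sort, no per-character scan of word2).

-- ===== PORT A =====
def checkBlanagrams (word1 : String) (word2 : String) : Bool :=
  -- d = {}; count = 0; word1 = sorted(word1); word2 = sorted(word2)
  let w1 := PySem.List.sorted word1.toList (fun c => c) false
  let w2 := PySem.List.sorted word2.toList (fun c => c) false
  -- if word1 == word2: return False
  if w1 = w2 then false
  else
    -- for i in range(len(word1)): if i not in d: d[i] = word1[i]
    -- (indices produced by range are in bounds, so word1[i] is PySem.List.pyGetD w1 i ' ')
    let d := (PySem.List.pyRange 0 (PySem.List.len w1) 1).foldl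
      (fun (d : PySem.Dict Int Char) i =>
        if ¬ (d.contains i = true) then d.insert i (PySem.List.pyGetD w1 i ' ') else d)
      PySem.Dict.empty
    -- for j, v in d.items(): if v not in word2: count += 1
    let count := d.items.foldl
      (fun (count : Int) p => if p.2 ∉ w2 then count + 1 else count) 0
    -- if count <= 1: return True else: return False
    if count ≤ 1 then true else false

-- ===== PORT B =====
def checkBlanagrams_alt (word1 : String) (word2 : String) : Bool :=
  let c1 := PySem.Dict.counter word1.toList
  let c2 := PySem.Dict.counter word2.toList
  -- if c1 == c2: return False   (Python dict equality: same key set, same value at each key)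
  if PySem.Set.equal c1.keys c2.keys && c1.keys.all (fun k => c1.get? k == c2.get? k) then false
  else
    -- missing = sum(n for ch, n in c1.items() if ch not in c2)
    let missing : Int := ((c1.items.filter (fun p => !(c2.contains p.1))).map (fun p => p.2)).sum
    -- return missing <= 1
    decide (missing ≤ 1)

-- ===== PRECONDITION & SPEC =====
def Spec_checkBlanagrams (word1 : String) (word2 : String) (out : Bool) : Prop := out = checkBlanagrams_alt word1 word2
instance (word1 : String) (word2 : String) (out : Bool) : Decidable (Spec_checkBlanagrams word1 word2 out) := by unfold Spec_checkBlanagrams; infer_instance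

-- ===== CLAIM (what is proved, stated in full; the proofs are below) =====
def Claim_equal_checkBlanagrams : Prop := ∀ (word1 : String) (word2 : String), Dom_checkBlanagrams word1 word2 → Spec_checkBlanagrams word1 word2 (checkBlanagrams word1 word2)

-- ===== LEMMAS AND PROOFS =====

-- the value both ports compute, in closed form
def pvModel (l1 l2 : List Char) : Bool :=
  if l1.Perm l2 then false
  else decide ((l1.countP (fun c => !(l2.contains c)) : Int) ≤ 1)

-- A's index loop inserts only fresh, distinct keys, so it appends its items in order.
lemma pvFoldItems (w : List Char) (l : List Int) (d : PySem.Dict Int Char)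
    (hnd : l.Nodup) (hf : ∀ i ∈ l, d.contains i = false) :
    (l.foldl (fun (d : PySem.Dict Int Char) i =>
        if ¬ (d.contains i = true) then d.insert i (PySem.List.pyGetD w i ' ') else d) d).items
      = d.items ++ l.map (fun i => (i, PySem.List.pyGetD w i ' ')) := by
  induction l generalizing d with
  | nil => simp
  | cons i t ih =>
    have hi : d.contains i = false := hf i (by simp)
    have hstep : ∀ j ∈ t, (d.insert i (PySem.List.pyGetD w i ' ')).contains j = false := by
      intro j hj
      rw [PySem.Dict.contains_insert]
      have hji : j ≠ i := by rintro rfl; exact (List.nodup_cons.mp hnd).1 hj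
      simp [hji, hf j (List.mem_cons_of_mem _ hj)]
    simp only [List.foldl_cons]
    rw [if_pos (by simp [hi])]
    rw [ih _ (List.nodup_cons.mp hnd).2 hstep,
        PySem.Dict.items_insert_of_not_contains _ _ hi]
    simp

-- countP with multiplicity equals the sum of counts over any nodup list of candidate elements.
lemma pvSumCount (l s : List Char) (p : Char → Bool) (hs : s.Nodup) (hsub : ∀ k ∈ l, k ∈ s) :
    ((s.filter p).map (fun k => (l.count k : Int))).sum = (l.countP p : Int) := by
  induction l with
  | nil => simp
  | cons x t ih =>
    have ht : ∀ k ∈ t, k ∈ s := fun k hk => hsub k (List.mem_cons_of_mem _ hk)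
    have hx : x ∈ s := hsub x (by simp)
    have hcnt : ∀ k, ((x :: t).count k : Int) = (t.count k : Int) + (if k = x then 1 else 0) := by
      intro k
      by_cases h : k = x <;> simp [h, Ne.symm]
    calc ((s.filter p).map (fun k => ((x :: t).count k : Int))).sum
        = ((s.filter p).map (fun k => (t.count k : Int) + (if k = x then 1 else 0))).sum := by
          simp only [hcnt]
      _ = ((s.filter p).map (fun k => (t.count k : Int))).sum
            + ((s.filter p).map (fun k => if k = x then (1:Int) else 0)).sum := by
          rw [← List.sum_map_add]
      _ = (t.countP p : Int) + (if p x then 1 else 0) := by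
          rw [ih ht]
          congr 1
          have hone : ((s.filter p).map (fun k => if k = x then (1:Int) else 0)).sum
              = ((s.filter p).count x : Int) := by
            rw [List.count_eq_countP, ← PySem.List.sum_map_ite_one_zero (fun k => k == x)]
            simp
          rw [hone]
          by_cases hp : p x = true
          · have : x ∈ s.filter p := List.mem_filter.mpr ⟨hx, hp⟩
            rw [List.count_eq_one_of_mem (hs.filter p) this]
            simp [hp]
          · have : x ∉ s.filter p := by
              intro h; exact hp (List.mem_filter.mp h).2
            rw [List.count_eq_zero_of_not_mem this]
            simp [hp]
      _ = ((x :: t).countP p : Int) := by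
          by_cases hp : p x = true <;> simp [hp]

-- B's dict-equality test is true exactly when the two words are permutations of one another.
lemma pvEqTest (l1 l2 : List Char) :
    (PySem.Set.equal (PySem.Dict.counter l1).keys (PySem.Dict.counter l2).keys
      && (PySem.Dict.counter l1).keys.all
          (fun k => (PySem.Dict.counter l1).get? k == (PySem.Dict.counter l2).get? k)) = true
      ↔ l1.Perm l2 := by
  have hget : ∀ (l : List Char) (k : Char), k ∈ l →
      (PySem.Dict.counter l).get? k = some ((l.count k : Int)) := by
    intro l k hk
    apply PySem.Dict.get?_of_mem_items (d := PySem.Dict.counter l)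
    · rw [PySem.Dict.items_counter]
      exact List.mem_map.mpr ⟨k, (PySem.Set.mem_ofList _ _).mpr hk, rfl⟩
    · exact PySem.Dict.nodup_keys_counter l
  constructor
  · intro h
    rw [Bool.and_eq_true] at h
    obtain ⟨hkeys, hvals⟩ := h
    rw [PySem.Set.equal_iff] at hkeys
    simp only [PySem.Dict.keys_counter, PySem.Set.mem_ofList] at hkeys
    rw [List.perm_iff_count]
    intro a
    by_cases ha : a ∈ l1
    · have ha2 : a ∈ l2 := (hkeys a).mp ha
      have := List.all_eq_true.mp hvals a (by
        rw [PySem.Dict.keys_counter]; exact (PySem.Set.mem_ofList _ _).mpr ha)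
      rw [hget l1 a ha, hget l2 a ha2] at this
      simpa using this
    · have ha2 : a ∉ l2 := fun h2 => ha ((hkeys a).mpr h2)
      rw [List.count_eq_zero_of_not_mem ha, List.count_eq_zero_of_not_mem ha2]
  · intro hp
    rw [Bool.and_eq_true]
    constructor
    · rw [PySem.Set.equal_iff]
      intro x
      simp only [PySem.Dict.keys_counter, PySem.Set.mem_ofList]
      exact ⟨fun h => hp.mem_iff.mp h, fun h => hp.mem_iff.mpr h⟩
    · rw [List.all_eq_true]
      intro k hk
      rw [PySem.Dict.keys_counter] at hk
      have hk1 : k ∈ l1 := (PySem.Set.mem_ofList _ _).mp hk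
      rw [hget l1 k hk1, hget l2 k (hp.mem_iff.mp hk1), List.perm_iff_count.mp hp k]
      simp

lemma pvA_char (word1 word2 : String) :
    checkBlanagrams word1 word2 = pvModel word1.toList word2.toList := by
  simp only [checkBlanagrams, pvModel]
  set w1 := PySem.List.sorted word1.toList (fun c => c) false with hw1
  set w2 := PySem.List.sorted word2.toList (fun c => c) false with hw2
  by_cases hperm : word1.toList.Perm word2.toList
  · rw [if_pos ((PySem.List.sorted_id_eq_sorted_id_iff_perm _ _).mpr hperm), if_pos hperm]
  · rw [if_neg (fun h => hperm ((PySem.List.sorted_id_eq_sorted_id_iff_perm _ _).mp h)),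
        if_neg hperm]
    have hitems : ((PySem.List.pyRange 0 (PySem.List.len w1) 1).foldl
        (fun (d : PySem.Dict Int Char) i =>
          if ¬ (d.contains i = true) then d.insert i (PySem.List.pyGetD w1 i ' ') else d)
        PySem.Dict.empty).items
        = (PySem.List.pyRange 0 (PySem.List.len w1) 1).map
            (fun i => (i, PySem.List.pyGetD w1 i ' ')) := by
      rw [pvFoldItems _ _ _ (PySem.List.nodup_pyRange_one _ _) (fun i _ => rfl)]
      rfl
    rw [hitems]
    rw [PySem.List.foldl_ite_add_one (fun p : Int × Char => p.2 ∉ w2)]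
    rw [List.countP_map]
    have hpred : ((fun p : Int × Char => decide (p.2 ∉ w2))
          ∘ (fun i => (i, PySem.List.pyGetD w1 i ' ')))
        = (fun c => decide (c ∉ w2)) ∘ (fun i => PySem.List.pyGetD w1 i ' ') := rfl
    rw [hpred, ← List.countP_map]
    have hrange : (PySem.List.pyRange 0 (PySem.List.len w1) 1).map
          (fun i => PySem.List.pyGetD w1 i ' ') = w1 := by
      have := PySem.List.map_pyGetD_pyRange_zero' w1 ' '
      simpa [PySem.List.len] using this
    rw [hrange]
    have hcount : w1.countP (fun c => decide (c ∉ w2))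
        = word1.toList.countP (fun c => !(word2.toList.contains c)) := by
      rw [(PySem.List.sorted_perm word1.toList (fun c => c) false).countP_eq]
      apply List.countP_congr
      intro c _
      simp [hw2, PySem.List.mem_sorted]
    rw [hcount]
    by_cases hc : ((word1.toList.countP (fun c => !(word2.toList.contains c)) : Int)) ≤ 1
    · rw [if_pos (by omega)]
      exact (decide_eq_true hc).symm
    · rw [if_neg (by omega)]
      exact (decide_eq_false hc).symm

lemma pvB_char (word1 word2 : String) :
    checkBlanagrams_alt word1 word2 = pvModel word1.toList word2.toList := by
  simp only [checkBlanagrams_alt, pvModel]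
  by_cases hperm : word1.toList.Perm word2.toList
  · rw [if_pos ((pvEqTest _ _).mpr hperm), if_pos hperm]
  · rw [if_neg (fun h => hperm ((pvEqTest _ _).mp h)), if_neg hperm]
    have hm : ((((PySem.Dict.counter word1.toList).items.filter
          (fun p => !((PySem.Dict.counter word2.toList).contains p.1))).map (fun p => p.2)).sum : Int)
        = (word1.toList.countP (fun c => !(word2.toList.contains c)) : Int) := by
      rw [PySem.Dict.items_counter, List.filter_map, List.map_map]
      have hpred : ((fun p : Char × Int => !((PySem.Dict.counter word2.toList).contains p.1))
            ∘ (fun k => (k, (word1.toList.count k : Int))))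
          = fun k => !(word2.toList.contains k) := by
        funext k
        simp [Function.comp, PySem.Dict.contains_counter]
      rw [hpred]
      have hsnd : ((fun p : Char × Int => p.2) ∘ (fun k => (k, (word1.toList.count k : Int))))
          = fun k => (word1.toList.count k : Int) := rfl
      rw [hsnd]
      exact pvSumCount _ _ _ (PySem.Set.nodup_ofList _)
        (fun k hk => (PySem.Set.mem_ofList _ _).mpr hk)
    rw [hm]

-- ===== VERDICT (by name: the statement is the Claim_ definition above) =====
theorem checkBlanagrams_spec : Claim_equal_checkBlanagrams := by
  intro word1 word2 _
  unfold Spec_checkBlanagrams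
  rw [pvA_char, pvB_char]
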